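-- pv_equiv track=rewrite | github.com/schniti269/MindWork | Methods/Flashcards.py | extract_flashcards
-- ===== SOURCE A (Python) =====
-- def extract_flashcards(api_response):
--     flashcards = []
--
--     # Annahme: Die API-Antwort enthält Flashcards in einem benutzerdefinierten Format
--     # Sie müssen den Code hier anpassen, um das genaue Format zu analysieren
--     start_tag = "<vorn>"
--     end_tag = "<hinten>"
--
--     while start_tag in api_response and end_tag in api_response:
--         start_index = api_response.index(start_tag)
--         end_index = api_response.index(end_tag)
--
--         front = api_response[start_index + len(start_tag):end_index]
--         back = api_response[end_index + len(end_tag):]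
--
--         flashcards.append({"front": front, "back": back})
--
--         # Entfernen Sie die extrahierte Flashcard aus der API-Antwort
--         api_response = api_response[end_index + len(end_tag):]
--
--     return flashcards
-- ===== SOURCE B (Python) =====
-- def extract_flashcards(api_response):
--     # Split once on the end tag; each piece before an end tag that contains the
--     # start tag yields one card: front = text after the first start tag in that
--     # piece, back = everything after that end tag.
--     parts = api_response.split("<hinten>")
--     flashcards = []
--     for i in range(len(parts) - 1):
--         if "<vorn>" in parts[i]:
--             front = parts[i].split("<vorn>", 1)[1]
--             flashcards.append({"front": front, "back": "<hinten>".join(parts[i + 1:])})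
--     return flashcards
-- ===== Notes on version B (the rewrite author's own statement) =====
-- stated objective: simpler
-- what changed: B splits the response once on the end tag and does one indexed pass over the resulting table, emitting a card for each piece that contains the start tag, instead of A's while loop that re-searches and truncates the whole remaining string per card.
-- intended difference: On inputs where some piece before an end tag contains no start tag although a start tag occurs later (e.g. '<hinten><vorn>'), A's inverted slice emits a spurious card with empty front and the whole tail as back, while B skips that piece and emits only well-formed <vorn>...<hinten> cards, which is the intended parse. — e.g. on extract_flashcards("<hinten><vorn>"): A returns [[("front", ""), ("back", "<vorn>")]], B returns []
import Mathlib
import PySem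

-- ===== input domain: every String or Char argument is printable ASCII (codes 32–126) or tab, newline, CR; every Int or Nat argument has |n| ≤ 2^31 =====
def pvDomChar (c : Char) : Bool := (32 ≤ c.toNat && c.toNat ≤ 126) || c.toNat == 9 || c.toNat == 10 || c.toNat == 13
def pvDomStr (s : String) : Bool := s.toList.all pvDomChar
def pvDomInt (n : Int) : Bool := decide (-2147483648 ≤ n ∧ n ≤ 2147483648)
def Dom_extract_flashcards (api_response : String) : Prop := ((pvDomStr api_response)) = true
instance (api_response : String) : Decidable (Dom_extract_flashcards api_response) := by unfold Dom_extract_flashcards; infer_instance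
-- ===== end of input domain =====

-- B splits once on the end tag and does one indexed pass over the pieces (objective: simpler);
-- on pieces without a start tag that A still turns into an empty-front card, B intentionally
-- differs (see D_ below).

def pvVorn : List Char := "<vorn>".toList      -- start_tag "<vorn>", length 6
def pvHinten : List Char := "<hinten>".toList  -- end_tag "<hinten>", length 8

-- ===== PORT A =====
-- literal port of A's while loop: test both tags on the whole remaining string,
-- take both first indices (s.index = Chars.find, exact because the `in`-guard ensures presence),
-- slice out front and back, recurse on the truncated string.
def pvExtractA (cs : List Char) : List (List (String × String)) :=
  if h : (PySem.Chars.isIn pvVorn cs && PySem.Chars.isIn pvHinten cs) = true then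
    let si := PySem.Chars.find cs pvVorn
    let ei := PySem.Chars.find cs pvHinten
    let front := PySem.Chars.slice cs (some (si + 6)) (some ei)
    let back := PySem.Chars.slice cs (some (ei + 8)) none
    [("front", String.ofList front), ("back", String.ofList back)] :: pvExtractA back
  else []
termination_by cs.length
decreasing_by
  have hb : pvHinten <:+: cs := (PySem.Chars.isIn_iff_infix _ _).1 (by
    simp only [Bool.and_eq_true] at h; exact h.2)
  have he : 0 ≤ PySem.Chars.find cs pvHinten := (PySem.Chars.find_nonneg_iff _ _).2 hb
  have hlen : 8 ≤ cs.length := by simpa [pvHinten] using hb.length_le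
  simp only [PySem.Chars.slice_eq_listSlice, PySem.List.slice_from _ (by omega : (0:Int) ≤ PySem.Chars.find cs pvHinten + 8), List.length_drop]
  omega

def extract_flashcards (api_response : String) : List (List (String × String)) :=
  pvExtractA api_response.toList

-- ===== PORT B =====
-- port of Source B.  s.split("<hinten>") (non-empty separator): split at the first occurrence,
-- repeat on the rest — hand-written, exact for a non-empty separator.
def pvSplit (cs : List Char) : List (List Char) :=
  let e := PySem.Chars.find cs pvHinten
  if he : e = -1 then [cs]
  else List.take e.toNat cs :: pvSplit (List.drop (e.toNat + 8) cs)
termination_by cs.length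
decreasing_by
  have h0 : 0 ≤ PySem.Chars.find cs pvHinten := by
    have := PySem.Chars.neg_one_le_find cs pvHinten; omega
  have hb : pvHinten <:+: cs := (PySem.Chars.find_nonneg_iff _ _).1 h0
  have hlen : 8 ≤ cs.length := by simpa [pvHinten] using hb.length_le
  simp only [List.length_drop]; omega

-- "<hinten>".join(parts) — hand-written, exact
def pvJoin : List (List Char) → List Char
  | [] => []
  | [p] => p
  | p :: q :: rest => p ++ pvHinten ++ pvJoin (q :: rest)

-- the for-loop over i in range(len(parts)-1): at each i the loop body sees parts[i] and
-- parts[i+1:]; "p :: rest with rest ≠ []" is exactly that shape.  front is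
-- parts[i].split("<vorn>",1)[1] = the text after the FIRST "<vorn>" (the guard ensures presence).
def pvGoB : List (List Char) → List (List (String × String))
  | [] => []
  | [_] => []
  | p :: q :: rest =>
    if PySem.Chars.isIn pvVorn p then
      [("front", String.ofList (List.drop ((PySem.Chars.find p pvVorn).toNat + 6) p)),
       ("back", String.ofList (pvJoin (q :: rest)))] :: pvGoB (q :: rest)
    else pvGoB (q :: rest)

def extract_flashcards_alt (api_response : String) : List (List (String × String)) :=
  pvGoB (pvSplit api_response.toList)

-- ===== PRECONDITION & SPEC =====
-- an occurrence of the end tag at position h / of the start tag at position v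
abbrev pvHintenAt (cs : List Char) (h : Nat) : Prop := pvHinten <+: cs.drop h
abbrev pvVornAt (cs : List Char) (v : Nat) : Prop := pvVorn <+: cs.drop v

-- On inputs where some piece before an end-tag occurrence contains no start tag although a
-- start tag occurs after that end tag, A emits a spurious empty-front card with the whole tail
-- as back (inverted slice), while B skips that piece; B's is the intended parse.
-- Closed form: some end-tag occurrence h has a start tag after it, and every start-tag
-- occurrence before h is separated from h by an earlier end-tag occurrence.  (The two
-- leading isIn conjuncts are implied by the quantified part; they keep the condition
-- cheap to check on tag-free strings.)
def D_extract_flashcards (api_response : String) : Prop :=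
  PySem.Chars.isIn pvVorn api_response.toList = true ∧
  PySem.Chars.isIn pvHinten api_response.toList = true ∧
  ∃ h < api_response.toList.length, pvHintenAt api_response.toList h ∧
    (∃ v < api_response.toList.length, pvVornAt api_response.toList v ∧ h + 8 ≤ v) ∧
    ∀ u < api_response.toList.length, pvVornAt api_response.toList u → u + 6 ≤ h →
      ∃ h' < h, pvHintenAt api_response.toList h' ∧ u + 6 ≤ h'
instance (api_response : String) : Decidable (D_extract_flashcards api_response) := by
  unfold D_extract_flashcards; infer_instance

def Spec_extract_flashcards (api_response : String) (out : List (List (String × String))) : Prop := ¬ D_extract_flashcards api_response → out = extract_flashcards_alt api_response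
instance (api_response : String) (out : List (List (String × String))) : Decidable (Spec_extract_flashcards api_response out) := by unfold Spec_extract_flashcards; infer_instance

def pvDiffWitness_extract_flashcards : String := "<hinten><vorn>"
def pvDiffWitnessOut_extract_flashcards : (List (List (String × String))) × (List (List (String × String))) :=
  ([[("front", ""), ("back", "<vorn>")]], [])

-- ===== CLAIM (what is proved, stated in full; the proofs are below) =====
def Claim_unchanged_extract_flashcards : Prop := ∀ (api_response : String), Dom_extract_flashcards api_response → Spec_extract_flashcards api_response (extract_flashcards api_response)
def Claim_changed_extract_flashcards : Prop := Dom_extract_flashcards (pvDiffWitness_extract_flashcards) ∧ D_extract_flashcards (pvDiffWitness_extract_flashcards) ∧ extract_flashcards (pvDiffWitness_extract_flashcards) = pvDiffWitnessOut_extract_flashcards.1 ∧ extract_flashcards_alt (pvDiffWitness_extract_flashcards) = pvDiffWitnessOut_extract_flashcards.2 ∧ pvDiffWitnessOut_extract_flashcards.1 ≠ pvDiffWitnessOut_extract_flashcards.2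
def Claim_exact_extract_flashcards : Prop := ∀ (api_response : String), Dom_extract_flashcards api_response → D_extract_flashcards api_response → extract_flashcards api_response ≠ extract_flashcards_alt api_response

-- ===== LEMMAS AND PROOFS =====

-- list-level restatement of D_extract_flashcards (definitionally equal)
def pvDbadL (cs : List Char) : Prop :=
  ∃ h < cs.length, pvHintenAt cs h ∧
    (∃ v < cs.length, pvVornAt cs v ∧ h + 8 ≤ v) ∧
    ∀ u < cs.length, pvVornAt cs u → u + 6 ≤ h →
      ∃ h' < h, pvHintenAt cs h' ∧ u + 6 ≤ h'

theorem pvD_iff (s : String) : D_extract_flashcards s ↔ pvDbadL s.toList := by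
  constructor
  · exact fun h => h.2.2
  · rintro ⟨h, hlt, hH, ⟨v, hvlt, hV, hv8⟩, hall⟩
    exact ⟨(PySem.Chars.isIn_iff_infix _ _).2 (hV.isInfix.trans (List.drop_suffix _ _).isInfix),
           (PySem.Chars.isIn_iff_infix _ _).2 (hH.isInfix.trans (List.drop_suffix _ _).isInfix),
           h, hlt, hH, ⟨v, hvlt, hV, hv8⟩, hall⟩

theorem pvHintenAt_le {cs : List Char} {h : Nat} (hH : pvHintenAt cs h) : h + 8 ≤ cs.length := by
  have h1 := hH.length_le
  rw [List.length_drop] at h1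
  have h8 : pvHinten.length = 8 := by decide
  omega

theorem pvVornAt_le {cs : List Char} {u : Nat} (hU : pvVornAt cs u) : u + 6 ≤ cs.length := by
  have h1 := hU.length_le
  rw [List.length_drop] at h1
  have h6 : pvVorn.length = 6 := by decide
  omega

theorem pv_drop_drop (cs : List Char) (m v : Nat) : (cs.drop m).drop v = cs.drop (m + v) := by
  rw [List.drop_drop, Nat.add_comm]

theorem pv_prefix_getElem? {l₁ l₂ : List Char} (h : l₁ <+: l₂) {k : Nat} (hk : k < l₁.length) :
    l₂[k]? = l₁[k]? := by
  obtain ⟨t, rfl⟩ := h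
  simp [List.getElem?_append_left, hk]

-- at the first "<hinten>" occurrence m, the string decomposes as cs = cs.take m ++ pvHinten ++ cs.drop (m+8)
theorem pv_decomp (cs : List Char) (he : 0 ≤ PySem.Chars.find cs pvHinten) :
    cs.drop (PySem.Chars.find cs pvHinten).toNat
      = pvHinten ++ cs.drop ((PySem.Chars.find cs pvHinten).toNat + 8) := by
  obtain ⟨t, ht⟩ := (PySem.Chars.find_spec he).1
  have h8 : pvHinten.length = 8 := by decide
  have : t = cs.drop ((PySem.Chars.find cs pvHinten).toNat + 8) := by
    have := congrArg (List.drop 8) ht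
    simpa [List.drop_append_of_le_length, h8, List.drop_drop, Nat.add_comm] using this
  rw [← ht, this]

-- a "<vorn>" occurrence cannot overlap the "<hinten>" occurrence at m: character clash
theorem pv_no_cross (cs : List Char) (m j : Nat)
    (hm : cs.drop m = pvHinten ++ cs.drop (m + 8))
    (hj : pvVorn <+: cs.drop j) (h1 : m < j + 6) (h2 : j < m + 8) : False := by
  have hB : ∀ i, i < 8 → cs[m + i]? = pvHinten[i]? := by
    intro i hi
    have : (cs.drop m)[i]? = cs[m + i]? := List.getElem?_drop
    rw [← this, hm, List.getElem?_append_left (by simpa [pvHinten] using hi)]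
  have hF : ∀ k, k < 6 → cs[j + k]? = pvVorn[k]? := by
    intro k hk
    have : (cs.drop j)[k]? = cs[j + k]? := List.getElem?_drop
    rw [← this, pv_prefix_getElem? hj (by simpa [pvVorn] using hk)]
  have key : ∀ i k, i < 8 → k < 6 → j + k = m + i → pvVorn[k]? = pvHinten[i]? := by
    intro i k hi hk hik
    have h1' := hF k hk
    rw [hik] at h1'
    exact h1'.symm.trans (hB i hi)
  rcases Nat.lt_trichotomy j m with hlt | heq | hgt
  · obtain ⟨k, hjk, hk1, hk5⟩ : ∃ k, j + k = m ∧ 1 ≤ k ∧ k ≤ 5 := ⟨m - j, by omega, by omega, by omega⟩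
    have := key 0 k (by omega) (by omega) (by omega)
    interval_cases k <;> exact absurd this (by decide)
  · have := key 1 1 (by omega) (by omega) (by omega)
    exact absurd this (by decide)
  · obtain ⟨i, hji, hi1, hi7⟩ : ∃ i, j = m + i ∧ 1 ≤ i ∧ i ≤ 7 := ⟨j - m, by omega, by omega, by omega⟩
    have := key i 0 (by omega) (by omega) (by omega)
    interval_cases i <;> exact absurd this (by decide)

-- two "<hinten>" occurrences cannot overlap either
theorem pv_no_overlap_h (cs : List Char) (m h : Nat)
    (hm : cs.drop m = pvHinten ++ cs.drop (m + 8))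
    (hh : pvHinten <+: cs.drop h) (h1 : m < h) (h2 : h < m + 8) : False := by
  have hB : ∀ i, i < 8 → cs[m + i]? = pvHinten[i]? := by
    intro i hi
    have : (cs.drop m)[i]? = cs[m + i]? := List.getElem?_drop
    rw [← this, hm, List.getElem?_append_left (by simpa [pvHinten] using hi)]
  have hF : ∀ k, k < 8 → cs[h + k]? = pvHinten[k]? := by
    intro k hk
    have : (cs.drop h)[k]? = cs[h + k]? := List.getElem?_drop
    rw [← this, pv_prefix_getElem? hh (by simpa [pvHinten] using hk)]
  have key : pvHinten[(0:Nat)]? = pvHinten[h - m]? := by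
    have h1' := hF 0 (by omega)
    have h2' := hB (h - m) (by omega)
    rw [Nat.add_zero] at h1'
    rw [show m + (h - m) = h from by omega] at h2'
    exact h1'.symm.trans h2'
  have hd1 : 1 ≤ h - m := by omega
  have hd7 : h - m ≤ 7 := by omega
  interval_cases h : h - m <;> exact absurd key (by decide)

theorem pv_infix_iff (p cs : List Char) : p <:+: cs ↔ ∃ u, p <+: cs.drop u := by
  constructor
  · intro h
    exact (PySem.Chars.exists_prefix_drop_iff_isIn p cs).2 ((PySem.Chars.isIn_iff_infix p cs).2 h)
  · intro ⟨u, hu⟩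
    exact (PySem.Chars.isIn_iff_infix p cs).1 ((PySem.Chars.exists_prefix_drop_iff_isIn p cs).1 ⟨u, hu⟩)

theorem pv_vorn_head_iff (cs : List Char) (m : Nat) :
    pvVorn <:+: cs.take m ↔ ∃ u, pvVornAt cs u ∧ u + 6 ≤ m := by
  constructor
  · intro h
    obtain ⟨u, hu⟩ := (pv_infix_iff pvVorn (cs.take m)).1 h
    rw [List.drop_take] at hu
    obtain ⟨hu1, hu2⟩ := List.prefix_take_iff.1 hu
    exact ⟨u, hu1, by simp [pvVorn] at hu2; omega⟩
  · rintro ⟨u, hu, h6⟩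
    have : pvVorn <+: (cs.take m).drop u := by
      rw [List.drop_take]
      exact List.prefix_take_iff.2 ⟨hu, by simpa [pvVorn] using (show 6 ≤ m - u by omega)⟩
    exact this.isInfix.trans (List.drop_suffix _ _).isInfix

-- classification of "<hinten>" occurrences when the first one is at m
theorem pv_hinten_class (cs : List Char) (m : Nat)
    (hm : cs.drop m = pvHinten ++ cs.drop (m + 8))
    (hmin : ∀ i < m, ¬ pvHinten <+: cs.drop i) (h : Nat) :
    pvHintenAt cs h ↔ (h = m ∨ (m + 8 ≤ h ∧ pvHintenAt (cs.drop (m + 8)) (h - (m + 8)))) := by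
  constructor
  · intro hH
    rcases Nat.lt_trichotomy h m with hlt | rfl | hgt
    · exact absurd hH (hmin h hlt)
    · exact Or.inl rfl
    · by_cases h8 : m + 8 ≤ h
      · refine Or.inr ⟨h8, ?_⟩
        rw [pvHintenAt, pv_drop_drop, show m + 8 + (h - (m + 8)) = h from by omega]
        exact hH
      · exact (pv_no_overlap_h cs m h hm hH hgt (by omega)).elim
  · rintro (rfl | ⟨h8, hH⟩)
    · rw [pvHintenAt, hm]; exact List.prefix_append _ _
    · rw [pvHintenAt, pv_drop_drop, show m + 8 + (h - (m + 8)) = h from by omega] at hH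
      exact hH

-- every "<vorn>" occurrence lies entirely inside the head or entirely inside the tail
theorem pv_vorn_class (cs : List Char) (m : Nat)
    (hm : cs.drop m = pvHinten ++ cs.drop (m + 8))
    (u : Nat) (hU : pvVornAt cs u) : u + 6 ≤ m ∨ m + 8 ≤ u := by
  by_contra hcon
  push Not at hcon
  exact pv_no_cross cs m u hm hU (by omega) (by omega)

theorem pv_vornAt_shift (cs : List Char) (m v : Nat) :
    pvVornAt (cs.drop m) v ↔ pvVornAt cs (m + v) := by
  rw [pvVornAt, pvVornAt, pv_drop_drop]

-- the D_ recurrence at the first "<hinten>" occurrence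
theorem pv_D_rec (cs : List Char) (m : Nat)
    (hm : cs.drop m = pvHinten ++ cs.drop (m + 8))
    (hmin : ∀ i < m, ¬ pvHinten <+: cs.drop i) :
    pvDbadL cs ↔ ((¬ pvVorn <:+: cs.take m ∧ pvVorn <:+: cs.drop (m + 8)) ∨ pvDbadL (cs.drop (m + 8))) := by
  constructor
  · rintro ⟨h, hlt, hH, ⟨v, hvlt, hV, hv8⟩, hall⟩
    rcases (pv_hinten_class cs m hm hmin h).1 hH with rfl | ⟨h8, hHt⟩
    · left
      constructor
      · intro hcon
        obtain ⟨u, hu, h6⟩ := (pv_vorn_head_iff cs h).1 hcon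
        obtain ⟨h', hh', hH', hu6'⟩ := hall u (by have := pvVornAt_le hu; omega) hu h6
        exact hmin h' hh' hH'
      · have hv : pvVornAt (cs.drop (h + 8)) (v - (h + 8)) := by
          rw [pv_vornAt_shift, show h + 8 + (v - (h + 8)) = v from by omega]
          exact hV
        exact (pv_infix_iff _ _).2 ⟨_, hv⟩
    · right
      refine ⟨h - (m + 8), by have := pvHintenAt_le hHt; omega, hHt, ?_, ?_⟩
      · refine ⟨v - (m + 8), ?_, ?_, by omega⟩
        · have : pvVornAt (cs.drop (m + 8)) (v - (m + 8)) := by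
            rw [pv_vornAt_shift, show m + 8 + (v - (m + 8)) = v from by omega]
            exact hV
          have := pvVornAt_le this
          omega
        · rw [pv_vornAt_shift, show m + 8 + (v - (m + 8)) = v from by omega]
          exact hV
      · intro u₀ hu₀lt hU₀ hu₀6
        have hU : pvVornAt cs (m + 8 + u₀) := (pv_vornAt_shift cs (m + 8) u₀).1 hU₀
        obtain ⟨h', hh', hH', hu6'⟩ :=
          hall (m + 8 + u₀) (by have := pvVornAt_le hU; omega) hU (by omega)
        rcases (pv_hinten_class cs m hm hmin h').1 hH' with rfl | ⟨h8', hHt'⟩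
        · omega
        · exact ⟨h' - (m + 8), by omega, hHt', by omega⟩
  · rintro (⟨hnh, hvt⟩ | ⟨h₀, h₀lt, hH₀, ⟨v₀, hv₀lt, hV₀, hv₀8⟩, hall₀⟩)
    · have hHm : pvHintenAt cs m := by rw [pvHintenAt, hm]; exact List.prefix_append _ _
      obtain ⟨v₀, hv₀⟩ := (pv_infix_iff pvVorn (cs.drop (m + 8))).1 hvt
      have hV : pvVornAt cs (m + 8 + v₀) := (pv_vornAt_shift cs (m + 8) v₀).1 hv₀
      refine ⟨m, by have := pvHintenAt_le hHm; omega, hHm,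
        ⟨m + 8 + v₀, by have := pvVornAt_le hV; omega, hV, by omega⟩, ?_⟩
      intro u _ hU h6
      exact absurd ((pv_vorn_head_iff cs m).2 ⟨u, hU, h6⟩) hnh
    · have hHm : pvHintenAt cs m := by rw [pvHintenAt, hm]; exact List.prefix_append _ _
      have hH : pvHintenAt cs (m + 8 + h₀) :=
        (pv_hinten_class cs m hm hmin (m + 8 + h₀)).2 (Or.inr ⟨by omega, by simpa using hH₀⟩)
      have hV : pvVornAt cs (m + 8 + v₀) := (pv_vornAt_shift cs (m + 8) v₀).1 hV₀
      refine ⟨m + 8 + h₀, by have := pvHintenAt_le hH; omega, hH,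
        ⟨m + 8 + v₀, by have := pvVornAt_le hV; omega, hV, by omega⟩, ?_⟩
      intro u _ hU h6
      rcases pv_vorn_class cs m hm u hU with h6m | h8u
      · exact ⟨m, by omega, hHm, by omega⟩
      · have hU₀ : pvVornAt (cs.drop (m + 8)) (u - (m + 8)) := by
          rw [pv_vornAt_shift, show m + 8 + (u - (m + 8)) = u from by omega]
          exact hU
        obtain ⟨h₀', hh₀', hH₀', hu6₀'⟩ :=
          hall₀ (u - (m + 8)) (by have := pvVornAt_le hU₀; omega) hU₀ (by omega)
        exact ⟨m + 8 + h₀', by omega, (pv_hinten_class cs m hm hmin _).2 (Or.inr ⟨by omega, by simpa using hH₀'⟩), by omega⟩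

theorem pv_D_no_hinten (cs : List Char) (hb : ¬ pvHinten <:+: cs) : ¬ pvDbadL cs := by
  rintro ⟨h, _, hH, _, _⟩
  exact hb (hH.isInfix.trans (List.drop_suffix _ _).isInfix)

theorem pv_D_no_vorn (cs : List Char) (hv : ¬ pvVorn <:+: cs) : ¬ pvDbadL cs := by
  rintro ⟨h, _, _, ⟨v, _, hV, _⟩, _⟩
  exact hv (hV.isInfix.trans (List.drop_suffix _ _).isInfix)

-- "<vorn>" is in cs iff it is in the head or in the tail of the "<hinten>"-partition
theorem pv_vorn_split (cs : List Char) (m : Nat)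
    (hm : cs.drop m = pvHinten ++ cs.drop (m + 8)) :
    pvVorn <:+: cs ↔ (pvVorn <:+: cs.take m ∨ pvVorn <:+: cs.drop (m + 8)) := by
  constructor
  · intro hin
    obtain ⟨j, hj⟩ := (pv_infix_iff pvVorn cs).1 hin
    rcases pv_vorn_class cs m hm j hj with h6 | h8
    · exact Or.inl ((pv_vorn_head_iff cs m).2 ⟨j, hj, h6⟩)
    · refine Or.inr ((pv_infix_iff _ _).2 ⟨j - (m + 8), ?_⟩)
      rw [pv_drop_drop, show m + 8 + (j - (m + 8)) = j from by omega]
      exact hj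
  · rintro (h | h)
    · exact h.trans (List.take_prefix _ _).isInfix
    · exact h.trans (List.drop_suffix _ _).isInfix

theorem pvSplit_ne_nil (cs : List Char) : pvSplit cs ≠ [] := by
  rw [pvSplit]
  split <;> simp

theorem pvJoin_cons (p : List Char) (ps : List (List Char)) (h : ps ≠ []) :
    pvJoin (p :: ps) = p ++ pvHinten ++ pvJoin ps := by
  cases ps with
  | nil => exact absurd rfl h
  | cons q rest => rfl

theorem pvGoB_cons (p : List Char) (ps : List (List Char)) (h : ps ≠ []) :
    pvGoB (p :: ps) =
      if PySem.Chars.isIn pvVorn p then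
        [("front", String.ofList (List.drop ((PySem.Chars.find p pvVorn).toNat + 6) p)),
         ("back", String.ofList (pvJoin ps))] :: pvGoB ps
      else pvGoB ps := by
  cases ps with
  | nil => exact absurd rfl h
  | cons q rest => rfl

theorem pvJoin_split : ∀ (n : Nat) (cs : List Char), cs.length ≤ n → pvJoin (pvSplit cs) = cs := by
  intro n
  induction n with
  | zero =>
    intro cs hlen
    have : cs = [] := List.eq_nil_of_length_eq_zero (by omega)
    subst this
    rw [pvSplit]
    simp [show PySem.Chars.find ([] : List Char) pvHinten = -1 from by decide, pvJoin]
  | succ n ih =>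
    intro cs hlen
    rw [pvSplit]
    by_cases hne : PySem.Chars.find cs pvHinten = -1
    · simp [hne, pvJoin]
    · have he : 0 ≤ PySem.Chars.find cs pvHinten := by
        have := PySem.Chars.neg_one_le_find cs pvHinten; omega
      have hb : pvHinten <:+: cs := (PySem.Chars.find_nonneg_iff _ _).1 he
      have hlen8 : 8 ≤ cs.length := by
        have := hb.length_le
        have h8 : pvHinten.length = 8 := by decide
        omega
      set m := (PySem.Chars.find cs pvHinten).toNat with hmdef
      have hdec : cs.drop m = pvHinten ++ cs.drop (m + 8) := pv_decomp cs he
      simp only [dif_neg hne]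
      rw [pvJoin_cons _ _ (pvSplit_ne_nil _), ih _ (by simp only [List.length_drop]; omega)]
      conv_rhs => rw [← List.take_append_drop m cs]
      rw [hdec, List.append_assoc]

theorem pvGoB_no_vorn : ∀ (n : Nat) (cs : List Char), cs.length ≤ n → ¬ pvVorn <:+: cs →
    pvGoB (pvSplit cs) = [] := by
  intro n
  induction n with
  | zero =>
    intro cs hlen _
    have : cs = [] := List.eq_nil_of_length_eq_zero (by omega)
    subst this
    rw [pvSplit]
    simp [show PySem.Chars.find ([] : List Char) pvHinten = -1 from by decide, pvGoB]
  | succ n ih =>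
    intro cs hlen hv
    rw [pvSplit]
    by_cases hne : PySem.Chars.find cs pvHinten = -1
    · simp [hne, pvGoB]
    · have he : 0 ≤ PySem.Chars.find cs pvHinten := by
        have := PySem.Chars.neg_one_le_find cs pvHinten; omega
      have hb : pvHinten <:+: cs := (PySem.Chars.find_nonneg_iff _ _).1 he
      have hlen8 : 8 ≤ cs.length := by
        have := hb.length_le
        have h8 : pvHinten.length = 8 := by decide
        omega
      set m := (PySem.Chars.find cs pvHinten).toNat with hmdef
      simp only [dif_neg hne]
      rw [pvGoB_cons _ _ (pvSplit_ne_nil _)]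
      have hhead : PySem.Chars.isIn pvVorn (cs.take m) = false := by
        rw [PySem.Chars.isIn_eq_false_iff]
        intro hcon
        exact hv (hcon.trans (List.take_prefix _ _).isInfix)
      rw [if_neg (by simp [hhead])]
      exact ih _ (by simp only [List.length_drop]; omega)
        (fun hcon => hv (hcon.trans (List.drop_suffix _ _).isInfix))

-- first occurrence of "<vorn>" when it lies inside the head
theorem pv_find_take (cs : List Char) (m : Nat) (h : pvVorn <:+: cs.take m) :
    PySem.Chars.find cs pvVorn = PySem.Chars.find (cs.take m) pvVorn ∧
      (PySem.Chars.find cs pvVorn).toNat + 6 ≤ m := by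
  have hv : 0 ≤ PySem.Chars.find (cs.take m) pvVorn := (PySem.Chars.find_nonneg_iff _ _).2 h
  obtain ⟨hvpre, hvmin⟩ := PySem.Chars.find_spec hv
  set v := (PySem.Chars.find (cs.take m) pvVorn).toNat with hvdef
  have hdt : (cs.take m).drop v = (cs.drop v).take (m - v) := List.drop_take
  have hvcs : pvVorn <+: cs.drop v := (List.prefix_take_iff.1 (hdt ▸ hvpre)).1
  have hv6 : v + 6 ≤ m := by
    have := hvpre.length_le
    simp [pvVorn, List.length_drop, List.length_take] at this
    omega
  have hf : 0 ≤ PySem.Chars.find cs pvVorn :=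
    (PySem.Chars.find_nonneg_iff _ _).2 (hvcs.isInfix.trans (List.drop_suffix _ _).isInfix)
  obtain ⟨hfpre, hfmin⟩ := PySem.Chars.find_spec hf
  set f := (PySem.Chars.find cs pvVorn).toNat with hfdef
  have hfv : f ≤ v := by
    by_contra hcon
    exact hfmin v (by omega) hvcs
  have hfhead : pvVorn <+: (cs.take m).drop f := by
    rw [List.drop_take]
    exact List.prefix_take_iff.2 ⟨hfpre, by simpa [pvVorn] using (show 6 ≤ m - f by omega)⟩
  have hvf : v ≤ f := by
    by_contra hcon
    exact hvmin f (by omega) hfhead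
  exact ⟨by omega, by omega⟩

-- MAIN: outside D_ the two programs agree, and inside D_ B's card list is strictly shorter
theorem pv_main : ∀ (n : Nat) (cs : List Char), cs.length ≤ n →
    ((¬ pvDbadL cs → pvExtractA cs = pvGoB (pvSplit cs)) ∧
     (pvGoB (pvSplit cs)).length ≤ (pvExtractA cs).length ∧
     (pvDbadL cs → (pvGoB (pvSplit cs)).length < (pvExtractA cs).length)) := by
  intro n
  induction n with
  | zero =>
    intro cs hlen
    have : cs = [] := List.eq_nil_of_length_eq_zero (by omega)
    subst this
    rw [pvExtractA, pvSplit]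
    refine ⟨fun _ => ?_, ?_, fun hD => ?_⟩ <;>
      simp_all [show PySem.Chars.find ([] : List Char) pvHinten = -1 from by decide,
        show PySem.Chars.isIn pvVorn ([] : List Char) = false from by decide, pvGoB,
        pvDbadL]
  | succ n ih =>
    intro cs hlen
    by_cases hb : pvHinten <:+: cs
    case neg =>
      -- no end tag: A returns [], and split returns the single piece [cs]
      have hbin : PySem.Chars.isIn pvHinten cs = false := by
        rw [PySem.Chars.isIn_eq_false_iff]; exact hb
      have hne : PySem.Chars.find cs pvHinten = -1 := (PySem.Chars.find_eq_neg_one_iff _ _).2 hb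
      have hnD := pv_D_no_hinten cs hb
      rw [pvExtractA, pvSplit]
      refine ⟨fun _ => ?_, ?_, fun hD => absurd hD hnD⟩ <;> simp [hbin, hne, pvGoB]
    case pos =>
      have he : 0 ≤ PySem.Chars.find cs pvHinten := (PySem.Chars.find_nonneg_iff _ _).2 hb
      have hne : ¬ (PySem.Chars.find cs pvHinten = -1) := by omega
      have hbin : PySem.Chars.isIn pvHinten cs = true := (PySem.Chars.isIn_iff_infix _ _).2 hb
      have hlen8 : 8 ≤ cs.length := by
        have := hb.length_le
        have h8 : pvHinten.length = 8 := by decide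
        omega
      set m := (PySem.Chars.find cs pvHinten).toNat with hmdef
      have hdec : cs.drop m = pvHinten ++ cs.drop (m + 8) := pv_decomp cs he
      have hmin : ∀ i < m, ¬ pvHinten <+: cs.drop i := (PySem.Chars.find_spec he).2
      have hDrec := pv_D_rec cs m hdec hmin
      have hL := pv_vorn_split cs m hdec
      have hbackA : PySem.Chars.slice cs (some (PySem.Chars.find cs pvHinten + 8)) none
          = cs.drop (m + 8) := by
        rw [PySem.Chars.slice_eq_listSlice, PySem.List.slice_from _ (by omega)]
        congr 1; omega
      have htlen : (cs.drop (m + 8)).length ≤ n := by simp only [List.length_drop]; clear_value m; omega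
      obtain ⟨ih1, ih2, ih3⟩ := ih _ htlen
      have hsplit : pvSplit cs = cs.take m :: pvSplit (cs.drop (m + 8)) := by
        rw [pvSplit]; simp only [dif_neg hne]; rw [hmdef]
      have hjoin : pvJoin (pvSplit (cs.drop (m + 8))) = cs.drop (m + 8) :=
        pvJoin_split n _ htlen
      by_cases hh : pvVorn <:+: cs.take m
      · -- start tag inside the head piece: both sides emit the same card
        have hvin : PySem.Chars.isIn pvVorn cs = true :=
          (PySem.Chars.isIn_iff_infix _ _).2 (hL.2 (Or.inl hh))
        have hhin : PySem.Chars.isIn pvVorn (cs.take m) = true :=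
          (PySem.Chars.isIn_iff_infix _ _).2 hh
        obtain ⟨hfeq, hf6⟩ := pv_find_take cs m hh
        have hffix : 0 ≤ PySem.Chars.find cs pvVorn :=
          (PySem.Chars.find_nonneg_iff _ _).2 (hL.2 (Or.inl hh))
        have hfrontA : PySem.Chars.slice cs (some (PySem.Chars.find cs pvVorn + 6))
            (some (PySem.Chars.find cs pvHinten))
            = List.drop ((PySem.Chars.find (cs.take m) pvVorn).toNat + 6) (cs.take m) := by
          rw [PySem.Chars.slice_eq_listSlice,
              PySem.List.slice_toNat cs (a := PySem.Chars.find cs pvVorn + 6)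
                (b := PySem.Chars.find cs pvHinten) (by omega) (by omega),
              List.drop_take, ← hfeq,
              show (PySem.Chars.find cs pvVorn + 6).toNat = (PySem.Chars.find cs pvVorn).toNat + 6 from by omega,
              hmdef]
        have hA : pvExtractA cs =
            [("front", String.ofList (List.drop ((PySem.Chars.find (cs.take m) pvVorn).toNat + 6) (cs.take m))),
             ("back", String.ofList (cs.drop (m + 8)))] :: pvExtractA (cs.drop (m + 8)) := by
          rw [pvExtractA]
          simp only [hvin, hbin, Bool.and_self, dite_true, hbackA, hfrontA]
        have hB : pvGoB (pvSplit cs) =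
            [("front", String.ofList (List.drop ((PySem.Chars.find (cs.take m) pvVorn).toNat + 6) (cs.take m))),
             ("back", String.ofList (cs.drop (m + 8)))] :: pvGoB (pvSplit (cs.drop (m + 8))) := by
          rw [hsplit, pvGoB_cons _ _ (pvSplit_ne_nil _), if_pos hhin, hjoin]
        have hDiff : pvDbadL cs ↔ pvDbadL (cs.drop (m + 8)) := by
          rw [hDrec]
          simp [hh]
        refine ⟨fun hnD => ?_, ?_, fun hD => ?_⟩
        · rw [hA, hB, ih1 (fun hD => hnD (hDiff.2 hD))]
        · rw [hA, hB]; simpa using ih2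
        · rw [hA, hB]; simpa using ih3 (hDiff.1 hD)
      · by_cases ht : pvVorn <:+: cs.drop (m + 8)
        · -- start tag only after the end tag: A emits the spurious empty-front card, B skips
          have hD : pvDbadL cs := hDrec.2 (Or.inl ⟨hh, ht⟩)
          have hvin : PySem.Chars.isIn pvVorn cs = true :=
            (PySem.Chars.isIn_iff_infix _ _).2 (hL.2 (Or.inr ht))
          have hhin : PySem.Chars.isIn pvVorn (cs.take m) = false := by
            rw [PySem.Chars.isIn_eq_false_iff]; exact hh
          have hA : pvExtractA cs =
              [("front", String.ofList (PySem.Chars.slice cs (some (PySem.Chars.find cs pvVorn + 6))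
                  (some (PySem.Chars.find cs pvHinten)))),
               ("back", String.ofList (cs.drop (m + 8)))] :: pvExtractA (cs.drop (m + 8)) := by
            rw [pvExtractA]
            simp only [hvin, hbin, Bool.and_self, dite_true, hbackA]
          have hB : pvGoB (pvSplit cs) = pvGoB (pvSplit (cs.drop (m + 8))) := by
            rw [hsplit, pvGoB_cons _ _ (pvSplit_ne_nil _), if_neg (by simp [hhin])]
          refine ⟨fun hnD => absurd hD hnD, ?_, fun _ => ?_⟩
          · rw [hA, hB]; simp; omega
          · rw [hA, hB]; simp; omega
        · -- no start tag anywhere: both return []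
          have hvin : PySem.Chars.isIn pvVorn cs = false := by
            rw [PySem.Chars.isIn_eq_false_iff]
            intro hcon
            rcases hL.1 hcon with h | h
            · exact hh h
            · exact ht h
          have hnv : ¬ pvVorn <:+: cs := by
            rw [← PySem.Chars.isIn_eq_false_iff]; exact hvin
          have hA : pvExtractA cs = [] := by
            rw [pvExtractA]; simp [hvin]
          have hB : pvGoB (pvSplit cs) = [] := pvGoB_no_vorn (n + 1) cs hlen hnv
          exact ⟨fun _ => by rw [hA, hB], by rw [hA, hB], fun hD => absurd hD (pv_D_no_vorn cs hnv)⟩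

-- ===== VERDICT (by name: the statement is the Claim_ definition above) =====
theorem extract_flashcards_spec : Claim_unchanged_extract_flashcards := by
  intro s _ hnD
  show extract_flashcards s = extract_flashcards_alt s
  exact (pv_main s.toList.length s.toList le_rfl).1 (fun hD => hnD ((pvD_iff s).2 hD))

theorem extract_flashcards_changed : Claim_changed_extract_flashcards := by
  unfold Claim_changed_extract_flashcards
  refine ⟨by decide, by decide, ?_, ?_, by decide⟩
  · show extract_flashcards "<hinten><vorn>" = [[("front", ""), ("back", "<vorn>")]]
    have e1 : PySem.Chars.find "<hinten><vorn>".toList pvHinten = 0 := by decide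
    have e2 : PySem.Chars.find "<hinten><vorn>".toList pvVorn = 8 := by decide
    have e3 : PySem.Chars.isIn pvVorn "<hinten><vorn>".toList = true := by decide
    have e4 : PySem.Chars.isIn pvHinten "<hinten><vorn>".toList = true := by decide
    have e5 : PySem.Chars.slice "<hinten><vorn>".toList (some ((0:Int) + 8)) none = "<vorn>".toList := by decide
    have e6 : PySem.Chars.slice "<hinten><vorn>".toList (some ((8:Int) + 6)) (some (0:Int)) = ([]:List Char) := by decide
    have e7 : PySem.Chars.isIn pvHinten "<vorn>".toList = false := by decide
    rw [extract_flashcards, pvExtractA]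
    simp only [e1, e2, e3, e4, e5, e6, Bool.and_self, dite_true]
    rw [pvExtractA]
    simp only [e7, Bool.and_false, Bool.false_eq_true, dite_false]
    decide
  · show extract_flashcards_alt "<hinten><vorn>" = []
    have e1 : PySem.Chars.find "<hinten><vorn>".toList pvHinten = 0 := by decide
    have e8 : PySem.Chars.find (List.drop ((0:Int).toNat + 8) "<hinten><vorn>".toList) pvHinten = -1 := by decide
    rw [extract_flashcards_alt, pvSplit]
    simp only [e1]
    rw [pvSplit]
    simp only [e8, dite_true]
    decide

theorem extract_flashcards_tight : Claim_exact_extract_flashcards := by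
  intro s _ hD hEq
  have h := (pv_main s.toList.length s.toList le_rfl).2.2 ((pvD_iff s).1 hD)
  have hEq' : pvExtractA s.toList = pvGoB (pvSplit s.toList) := hEq
  rw [hEq'] at h
  omega
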